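-- pv_equiv track=rewrite | github.com/mingyuchoo/python-study-series | algorithm/01_DataStructures/01_BuiltInDataStructures/03_String/no_zero_world.py | number_converter
-- ===== SOURCE A (Python) =====
-- def number_converter(num_1: int, num_2: int) -> int:
--     num_to_work: list = list(str(num_1 + num_2))
--
--     for i in range(len(num_to_work)):
--         if num_to_work[i] == '0':
--             num_to_work[i] = '1'
--         else:
--             pass
--     return int(''.join(num_to_work))
-- ===== SOURCE B (Python) =====
-- def number_converter(num_1: int, num_2: int) -> int:
--     total = num_1 + num_2
--     sign = -1 if total < 0 else 1
--     n = abs(total)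
--     if n == 0:
--         return 1
--     result = 0
--     place = 1
--     while n:
--         n, d = divmod(n, 10)
--         result += (d if d else 1) * place
--         place *= 10
--     return sign * result
-- ===== Notes on version B (the rewrite author's own statement) =====
-- stated objective: alternative
-- what changed: Replaces A's string round-trip (str(), a per-character replacement loop over list(str), join, int()) by pure integer arithmetic: extract digits with divmod, map each 0 digit to 1, and rebuild the number by place value, applying the sign at the end.
import Mathlib
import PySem

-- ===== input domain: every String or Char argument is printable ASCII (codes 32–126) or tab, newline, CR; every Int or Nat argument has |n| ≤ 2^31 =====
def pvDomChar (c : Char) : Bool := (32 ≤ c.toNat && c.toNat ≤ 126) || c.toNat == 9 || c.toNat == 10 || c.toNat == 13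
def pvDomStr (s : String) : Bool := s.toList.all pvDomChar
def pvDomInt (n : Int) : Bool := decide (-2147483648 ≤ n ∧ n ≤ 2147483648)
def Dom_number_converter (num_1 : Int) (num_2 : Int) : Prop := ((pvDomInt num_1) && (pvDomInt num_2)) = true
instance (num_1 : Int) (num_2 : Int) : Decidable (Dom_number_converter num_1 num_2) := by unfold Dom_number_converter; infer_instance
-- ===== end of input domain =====

-- B replaces A's string round-trip (str -> per-character loop -> int) by pure integer
-- arithmetic: extract digits with divmod, map 0 -> 1, and rebuild by place value.

-- ===== PORT A =====
def number_converter (num_1 : Int) (num_2 : Int) : Int :=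
  -- num_to_work = list(str(num_1 + num_2))
  let numToWork : List Char := PySem.Int.toChars (num_1 + num_2)
  -- for i in range(len(num_to_work)): if num_to_work[i] == '0': num_to_work[i] = '1'
  -- (every i produced by range(len(..)) is in range, so the total forms pyGetD/pySetD
  --  are exact here and their defaults are never taken)
  let looped : List Char :=
    (PySem.List.pyRange 0 (numToWork.length : Int) 1).foldl
      (fun l i => if PySem.List.pyGetD l i ' ' = '0' then PySem.List.pySetD l i '1' else l)
      numToWork
  -- int(''.join(num_to_work)); this parse always succeeds (proved below), so .getD's
  -- default is never taken
  (PySem.Int.ofChars? looped).getD 0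

-- ===== PORT B =====
-- while n: n, d = divmod(n, 10); result += (d if d else 1) * place; place *= 10
def altLoop (n result place : Nat) : Nat :=
  if h : n = 0 then result
  else altLoop (n / 10) (result + (if n % 10 = 0 then 1 else n % 10) * place) (place * 10)
termination_by n
decreasing_by exact Nat.div_lt_self (Nat.pos_of_ne_zero h) (by norm_num)

def number_converter_alt (num_1 : Int) (num_2 : Int) : Int :=
  let total := num_1 + num_2
  let sign : Int := if total < 0 then -1 else 1
  let n : Nat := total.natAbs
  if n = 0 then 1 else sign * (altLoop n 0 1 : Int)

-- ===== PRECONDITION & SPEC =====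
def Spec_number_converter (num_1 : Int) (num_2 : Int) (out : Int) : Prop := out = number_converter_alt num_1 num_2
instance (num_1 : Int) (num_2 : Int) (out : Int) : Decidable (Spec_number_converter num_1 num_2 out) := by unfold Spec_number_converter; infer_instance

-- ===== CLAIM (what is proved, stated in full; the proofs are below) =====
def Claim_equal_number_converter : Prop := ∀ (num_1 : Int) (num_2 : Int), Dom_number_converter num_1 num_2 → Spec_number_converter num_1 num_2 (number_converter num_1 num_2)

-- ===== LEMMAS AND PROOFS =====

def repl (c : Char) : Char := if c = '0' then '1' else c
def replD (d : Nat) : Nat := if d = 0 then 1 else d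

-- `PySem.Int.ofChars?` keeps its digit-run parser private; `pvWrapGo G` replicates its
-- outer wrapper so the private parser can be captured as the existential `G` in `exists_go`.

def pvDV (G : List Char → Bool → Nat → Option Nat) : List Char → Option Nat := fun ds =>
  match ds with
  | [] => none
  | cs => G cs false 0

def pvWrapGo (G : List Char → Bool → Nat → Option Nat) (s : List Char) : Option Int :=
  let cs := (List.dropWhile PySem.Int.isIntSpace (List.dropWhile PySem.Int.isIntSpace s).reverse).reverse
  match cs with
  | '-' :: ds => Option.map (fun n => -n) (do
      let a ← pvDV G ds
      pure ((a : Nat) : Int))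
  | '+' :: ds => Option.map (fun n => n) (do
      let a ← pvDV G ds
      pure ((a : Nat) : Int))
  | ds => Option.map (fun n => n) (do
      let a ← pvDV G ds
      pure ((a : Nat) : Int))

theorem exists_go : ∃ G : List Char → Bool → Nat → Option Nat,
    (∀ s, PySem.Int.ofChars? s = pvWrapGo G s) ∧
    (∀ b acc, G [] b acc = if b = true then some acc else none) ∧
    (∀ c rest b acc, G (c :: rest) b acc =
      if c.isDigit = true then G rest true (acc * 10 + (c.toNat - '0'.toNat))
      else if c = '_' ∧ b = true then
        (match rest with
         | d :: _ => if d.isDigit = true then G rest false acc else none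
         | [] => none)
      else none) := by
  refine ⟨?_, ?h1, ?h2, ?h3⟩
  case h1 => intro s; rfl
  case h2 => intro b acc; rfl
  case h3 => intro c rest b acc; rfl

def valNat (acc : Nat) (ds : List Char) : Nat :=
  ds.foldl (fun a c => a * 10 + (c.toNat - '0'.toNat)) acc

theorem go_digits (G : List Char → Bool → Nat → Option Nat)
    (h2 : ∀ b acc, G [] b acc = if b = true then some acc else none)
    (h3 : ∀ c rest b acc, G (c :: rest) b acc =
      if c.isDigit = true then G rest true (acc * 10 + (c.toNat - '0'.toNat))
      else if c = '_' ∧ b = true then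
        (match rest with
         | d :: _ => if d.isDigit = true then G rest false acc else none
         | [] => none)
      else none) :
    ∀ (ds : List Char) (b : Bool) (acc : Nat), (∀ c ∈ ds, c.isDigit = true) →
      (b = true ∨ ds ≠ []) → G ds b acc = some (valNat acc ds) := by
  intro ds
  induction ds with
  | nil =>
    intro b acc _ hb
    rcases hb with hb | hb
    · simp [h2, hb, valNat]
    · simp at hb
  | cons c rest ih =>
    intro b acc hdig _
    have hc : c.isDigit = true := hdig c (by simp)
    rw [h3, if_pos hc]
    rcases rest with _ | ⟨d, tail⟩
    · simp [h2, valNat]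
    · rw [ih _ _ (fun x hx => hdig x (by simp [hx])) (Or.inl rfl)]
      simp [valNat]

theorem digitChar_isDigit (d : Nat) (h : d < 10) : (Nat.digitChar d).isDigit = true := by
  interval_cases d <;> rfl

theorem digitChar_toNat (d : Nat) (h : d < 10) : (Nat.digitChar d).toNat - '0'.toNat = d := by
  interval_cases d <;> rfl

theorem isIntSpace_digitChar (d : Nat) (h : d < 10) : PySem.Int.isIntSpace (Nat.digitChar d) = false := by
  interval_cases d <;> rfl

theorem valNat_digits (L : List Nat) : ∀ acc, (∀ d ∈ L, d < 10) →
    valNat acc ((L.map Nat.digitChar).reverse) = acc * 10 ^ L.length + Nat.ofDigits 10 L := by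
  induction L with
  | nil => intro acc _; simp [valNat, Nat.ofDigits]
  | cons d L ih =>
    intro acc h
    have hd : d < 10 := h d (by simp)
    simp only [List.map_cons, List.reverse_cons]
    rw [valNat, List.foldl_append]
    rw [show List.foldl (fun a c => a * 10 + (c.toNat - '0'.toNat)) acc (L.map Nat.digitChar).reverse
        = valNat acc ((L.map Nat.digitChar).reverse) from rfl]
    rw [ih acc (fun x hx => h x (by simp [hx]))]
    simp only [List.foldl_cons, List.foldl_nil]
    rw [digitChar_toNat d hd, Nat.ofDigits_cons]
    simp [List.length_cons, pow_succ]
    ring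

theorem dropWhile_eq_self_of_all {p : Char → Bool} (s : List Char) (h : ∀ c ∈ s, p c = false) :
    List.dropWhile p s = s := by
  cases s with
  | nil => rfl
  | cons c rest => rw [List.dropWhile_cons, h c (by simp)]; simp

theorem clean_eq_self (s : List Char) (h : ∀ c ∈ s, PySem.Int.isIntSpace c = false) :
    (List.dropWhile PySem.Int.isIntSpace (List.dropWhile PySem.Int.isIntSpace s).reverse).reverse = s := by
  rw [dropWhile_eq_self_of_all s h]
  rw [dropWhile_eq_self_of_all s.reverse (fun c hc => h c (List.mem_reverse.mp hc))]
  exact List.reverse_reverse s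

theorem mem_rev_map_digitChar {L : List Nat} (hL : ∀ d ∈ L, d < 10) :
    ∀ c ∈ (L.map Nat.digitChar).reverse, ∃ d, d < 10 ∧ c = Nat.digitChar d := by
  intro c hc
  rw [List.mem_reverse, List.mem_map] at hc
  obtain ⟨d, hd, rfl⟩ := hc
  exact ⟨d, hL d hd, rfl⟩

theorem parse_pos (G : List Char → Bool → Nat → Option Nat)
    (h1 : ∀ s, PySem.Int.ofChars? s = pvWrapGo G s)
    (h2 : ∀ b acc, G [] b acc = if b = true then some acc else none)
    (h3 : ∀ c rest b acc, G (c :: rest) b acc =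
      if c.isDigit = true then G rest true (acc * 10 + (c.toNat - '0'.toNat))
      else if c = '_' ∧ b = true then
        (match rest with
         | d :: _ => if d.isDigit = true then G rest false acc else none
         | [] => none)
      else none)
    (L : List Nat) (hne : L ≠ []) (hL : ∀ d ∈ L, d < 10) :
    PySem.Int.ofChars? ((L.map Nat.digitChar).reverse) = some ((Nat.ofDigits 10 L : Nat) : Int) := by
  set s : List Char := (L.map Nat.digitChar).reverse with hs
  have hmem := mem_rev_map_digitChar hL
  have hdigs : ∀ c ∈ s, c.isDigit = true := by
    intro c hc; obtain ⟨d, hd, rfl⟩ := hmem c hc; exact digitChar_isDigit d hd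
  have hclean : (List.dropWhile PySem.Int.isIntSpace (List.dropWhile PySem.Int.isIntSpace s).reverse).reverse = s := by
    apply clean_eq_self
    intro c hc; obtain ⟨d, hd, rfl⟩ := hmem c hc; exact isIntSpace_digitChar d hd
  have hsne : s ≠ [] := by simp [hs, hne]
  have hval : G s false 0 = some (valNat 0 s) :=
    go_digits G h2 h3 s false 0 hdigs (Or.inr hsne)
  have hvn : valNat 0 s = Nat.ofDigits 10 L := by
    rw [hs, valNat_digits L 0 hL]; simp
  rw [h1, pvWrapGo]
  simp only [hclean]
  obtain ⟨c, t, hct⟩ := List.exists_cons_of_ne_nil hsne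
  have hdv : pvDV G s = some (Nat.ofDigits 10 L) := by
    rw [hct, show pvDV G (c :: t) = G (c :: t) false 0 from rfl]
    rw [← hct, hval, hvn]
  have hcmem : c ∈ s := by rw [hct]; simp
  obtain ⟨d, hd, hcd⟩ := hmem c hcmem
  subst hcd
  rw [hct] at hdv ⊢
  interval_cases d <;> ((conv_lhs => whnf); rw [hdv]; rfl)

theorem parse_neg (G : List Char → Bool → Nat → Option Nat)
    (h1 : ∀ s, PySem.Int.ofChars? s = pvWrapGo G s)
    (h2 : ∀ b acc, G [] b acc = if b = true then some acc else none)
    (h3 : ∀ c rest b acc, G (c :: rest) b acc =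
      if c.isDigit = true then G rest true (acc * 10 + (c.toNat - '0'.toNat))
      else if c = '_' ∧ b = true then
        (match rest with
         | d :: _ => if d.isDigit = true then G rest false acc else none
         | [] => none)
      else none)
    (L : List Nat) (hne : L ≠ []) (hL : ∀ d ∈ L, d < 10) :
    PySem.Int.ofChars? ('-' :: (L.map Nat.digitChar).reverse) = some (-((Nat.ofDigits 10 L : Nat) : Int)) := by
  set s : List Char := (L.map Nat.digitChar).reverse with hs
  have hmem := mem_rev_map_digitChar hL
  have hdigs : ∀ c ∈ s, c.isDigit = true := by
    intro c hc; obtain ⟨d, hd, rfl⟩ := hmem c hc; exact digitChar_isDigit d hd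
  have hclean : (List.dropWhile PySem.Int.isIntSpace (List.dropWhile PySem.Int.isIntSpace ('-'::s)).reverse).reverse = '-'::s := by
    apply clean_eq_self
    intro c hc
    rcases List.mem_cons.mp hc with rfl | hc
    · rfl
    · obtain ⟨d, hd, rfl⟩ := hmem c hc; exact isIntSpace_digitChar d hd
  have hsne : s ≠ [] := by simp [hs, hne]
  have hval : G s false 0 = some (valNat 0 s) :=
    go_digits G h2 h3 s false 0 hdigs (Or.inr hsne)
  have hvn : valNat 0 s = Nat.ofDigits 10 L := by
    rw [hs, valNat_digits L 0 hL]; simp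
  rw [h1, pvWrapGo]
  simp only [hclean]
  obtain ⟨c, t, hct⟩ := List.exists_cons_of_ne_nil hsne
  have hdv : pvDV G s = some (Nat.ofDigits 10 L) := by
    rw [hct, show pvDV G (c :: t) = G (c :: t) false 0 from rfl]
    rw [← hct, hval, hvn]
  conv_lhs => whnf
  rw [hdv]
  rfl

theorem loop_inv (b : List Char) : ∀ (a : List Char),
    (PySem.List.pyRange (a.length : Int) ((a.length + b.length : Nat) : Int) 1).foldl
      (fun l i => if PySem.List.pyGetD l i ' ' = '0' then PySem.List.pySetD l i '1' else l) (a ++ b)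
    = a ++ b.map repl := by
  induction b with
  | nil =>
    intro a
    simp [PySem.List.pyRange]
  | cons c b ih =>
    intro a
    have hlt : (a.length : Int) < ((a.length + (c :: b).length : Nat) : Int) := by
      push_cast [List.length_cons]; omega
    rw [PySem.List.pyRange_one_cons hlt, List.foldl_cons]
    have hget : PySem.List.pyGetD (a ++ c :: b) (a.length : Int) ' ' = c := by
      rw [PySem.List.pyGetD_natCast]
      rw [List.getD_eq_getElem _ _ (by simp)]
      simp
    have hset : PySem.List.pySetD (a ++ c :: b) (a.length : Int) '1' = a ++ '1' :: b := by
      rw [PySem.List.pySetD_natCast]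
      rw [List.set_append_right _ _ (Nat.le_refl _)]
      simp
    by_cases h0 : c = '0'
    · rw [hget, if_pos h0, hset]
      have := ih (a ++ ['1'])
      simp only [List.length_append, List.length_cons, List.length_nil, Nat.zero_add] at this ⊢
      rw [show a ++ '1' :: b = (a ++ ['1']) ++ b by simp] at *
      rw [show (a.length + 1 : Int) = ((a.length + 1 : Nat) : Int) by push_cast; ring]
      rw [show a.length + (b.length + 1) = a.length + 1 + b.length by omega]
      rw [this]
      simp [repl, h0]
    · rw [hget, if_neg h0]
      have := ih (a ++ [c])
      simp only [List.length_append, List.length_cons, List.length_nil, Nat.zero_add] at this ⊢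
      rw [show a ++ c :: b = (a ++ [c]) ++ b by simp] at *
      rw [show (a.length + 1 : Int) = ((a.length + 1 : Nat) : Int) by push_cast; ring]
      rw [show a.length + (b.length + 1) = a.length + 1 + b.length by omega]
      rw [this]
      simp [repl, h0]

theorem toDigitsCore_eq (f : Nat) : ∀ (n : Nat) (l : List Char), 0 < n → n < 10 ^ f →
    Nat.toDigitsCore 10 f n l = ((Nat.digits 10 n).map Nat.digitChar).reverse ++ l := by
  induction f with
  | zero => intro n l hn hf; simp at hf; omega
  | succ f ih =>
    intro n l hn hf
    rw [Nat.toDigitsCore]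
    by_cases h : n / 10 = 0
    · rw [if_pos h]
      have hlt : n < 10 := by omega
      rw [Nat.digits_def' (by norm_num : 1 < 10) hn]
      rw [show n / 10 = 0 from h, Nat.digits_zero]
      simp [Nat.mod_eq_of_lt hlt]
    · rw [if_neg h]
      rw [ih (n / 10) _ (Nat.pos_of_ne_zero h) (by
        have : n / 10 < 10 ^ f := by
          apply Nat.div_lt_of_lt_mul
          rw [← pow_succ']
          exact hf
        exact this)]
      rw [Nat.digits_def' (by norm_num : 1 < 10) hn]
      simp [List.append_assoc]

theorem altLoop_eq_ofDigits (n : Nat) : ∀ (r p : Nat),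
    altLoop n r p = r + p * Nat.ofDigits 10 ((Nat.digits 10 n).map replD) := by
  induction n using Nat.strong_induction_on with
  | _ n ih =>
    intro r p
    rw [altLoop]
    by_cases h : n = 0
    · simp [h]
    · rw [dif_neg h]
      rw [ih (n / 10) (Nat.div_lt_self (Nat.pos_of_ne_zero h) (by norm_num))]
      rw [Nat.digits_def' (by norm_num : 1 < 10) (Nat.pos_of_ne_zero h)]
      rw [List.map_cons, Nat.ofDigits_cons]
      simp only [replD]
      ring

theorem repl_digitChar (d : Nat) (h : d < 10) : repl (Nat.digitChar d) = Nat.digitChar (replD d) := by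
  interval_cases d <;> rfl

theorem replD_lt (d : Nat) (h : d < 10) : replD d < 10 := by
  unfold replD; split <;> omega

theorem map_repl_digits (L : List Nat) (h : ∀ d ∈ L, d < 10) :
    ((L.map Nat.digitChar).reverse).map repl = ((L.map replD).map Nat.digitChar).reverse := by
  simp only [← List.map_reverse, List.map_map]
  apply List.map_congr_left
  intro d hd
  exact repl_digitChar d (h d (List.mem_reverse.mp hd))

theorem loop_eq_map (s : List Char) :
    (PySem.List.pyRange 0 (s.length : Int) 1).foldl
      (fun l i => if PySem.List.pyGetD l i ' ' = '0' then PySem.List.pySetD l i '1' else l) s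
    = s.map repl := by
  have := loop_inv s []
  simpa using this

theorem toDigits_eq (n : Nat) (hn : 0 < n) :
    Nat.toDigits 10 n = ((Nat.digits 10 n).map Nat.digitChar).reverse := by
  have h : n < 10 ^ (n + 1) :=
    lt_of_lt_of_le (Nat.lt_pow_self (by norm_num)) (Nat.pow_le_pow_right (by norm_num) (Nat.le_succ n))
  simpa using toDigitsCore_eq (n + 1) n [] hn h

-- ===== VERDICT (by name: the statement is the Claim_ definition above) =====
theorem number_converter_spec : Claim_equal_number_converter := by
  intro num_1 num_2 _
  unfold Spec_number_converter
  obtain ⟨G, h1, h2, h3⟩ := exists_go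
  show number_converter num_1 num_2 = number_converter_alt num_1 num_2
  simp only [number_converter, number_converter_alt]
  rw [loop_eq_map]
  rcases lt_trichotomy (num_1 + num_2) 0 with hneg | hzero | hpos
  · -- negative total
    have hm : (num_1 + num_2).natAbs ≠ 0 := by omega
    rw [show PySem.Int.toChars (num_1 + num_2)
        = '-' :: Nat.toDigits 10 (num_1 + num_2).natAbs by
      rw [PySem.Int.toChars, if_pos hneg]]
    rw [toDigits_eq _ (Nat.pos_of_ne_zero hm)]
    rw [List.map_cons, show repl '-' = '-' from rfl]
    have hbase : ∀ d ∈ Nat.digits 10 (num_1 + num_2).natAbs, d < 10 :=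
      fun d hd => Nat.digits_lt_base (by norm_num) hd
    rw [map_repl_digits _ hbase]
    rw [parse_neg G h1 h2 h3 _
      (by simp [Nat.digits_ne_nil_iff_ne_zero.mpr hm])
      (fun d hd => by
        rw [List.mem_map] at hd
        obtain ⟨e, he, rfl⟩ := hd
        exact replD_lt e (hbase e he))]
    rw [if_neg hm, if_pos hneg]
    rw [altLoop_eq_ofDigits]
    simp only [Option.getD_some]
    push_cast
    ring
  · -- zero total
    rw [hzero]
    rfl
  · -- positive total
    have hm : (num_1 + num_2).toNat ≠ 0 := by omega
    rw [show PySem.Int.toChars (num_1 + num_2)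
        = Nat.toDigits 10 (num_1 + num_2).toNat by
      rw [PySem.Int.toChars, if_neg (by omega)]]
    rw [toDigits_eq _ (Nat.pos_of_ne_zero hm)]
    have hbase : ∀ d ∈ Nat.digits 10 (num_1 + num_2).toNat, d < 10 :=
      fun d hd => Nat.digits_lt_base (by norm_num) hd
    rw [map_repl_digits _ hbase]
    rw [parse_pos G h1 h2 h3 _
      (by simp [Nat.digits_ne_nil_iff_ne_zero.mpr hm])
      (fun d hd => by
        rw [List.mem_map] at hd
        obtain ⟨e, he, rfl⟩ := hd
        exact replD_lt e (hbase e he))]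
    have hna : (num_1 + num_2).natAbs = (num_1 + num_2).toNat := by omega
    rw [hna, if_neg hm, if_neg (by omega)]
    rw [altLoop_eq_ofDigits]
    simp only [Option.getD_some]
    push_cast
    ring
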